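-- pv_equiv track=rewrite | github.com/ngarde2882/Portfolio | Disc-Stuff/Project P/ivy-scraper.py | lower_to_upper
-- ===== SOURCE A (Python) =====
-- def lower_to_upper(s):
--     for c in range(1, len(s)):
--         if s[c] == s[c].upper():
--             if s[c]=='-': return None # check against Ho-Oh and Porygon-Z that should return None
--             if s[c]==' ': return None # check against Mime Jr.
--             if s[c]=='.': return None # check against Mr. Mime and Mr. Rime
--             if s[c]==':': return None # check against Type: Null
--             if s[c]=='\'': return None # check against Farfetch'd and Sirfetch'd
--             if s[c-1] == s[c-1].lower():
--                 return c
--     return None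
-- ===== SOURCE B (Python) =====
-- SPECIAL = "- .:'"
--
-- def lower_to_upper(s):
--     n = len(s)
--     pos_special = next((c for c in range(1, n) if s[c] in SPECIAL), None)
--     pos_good = next((c for c in range(1, n)
--                      if s[c] == s[c].upper()
--                      and s[c] not in SPECIAL
--                      and s[c - 1] == s[c - 1].lower()), None)
--     if pos_good is not None and (pos_special is None or pos_good < pos_special):
--         return pos_good
--     return None
-- ===== Notes on version B (the rewrite author's own statement) =====
-- stated objective: alternative
-- what changed: B replaces A's single early-exit loop with eleven branches by two independent first-index scans (first special character, first lowercase-to-uppercase boundary) combined by one comparison at the end.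
import Mathlib
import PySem

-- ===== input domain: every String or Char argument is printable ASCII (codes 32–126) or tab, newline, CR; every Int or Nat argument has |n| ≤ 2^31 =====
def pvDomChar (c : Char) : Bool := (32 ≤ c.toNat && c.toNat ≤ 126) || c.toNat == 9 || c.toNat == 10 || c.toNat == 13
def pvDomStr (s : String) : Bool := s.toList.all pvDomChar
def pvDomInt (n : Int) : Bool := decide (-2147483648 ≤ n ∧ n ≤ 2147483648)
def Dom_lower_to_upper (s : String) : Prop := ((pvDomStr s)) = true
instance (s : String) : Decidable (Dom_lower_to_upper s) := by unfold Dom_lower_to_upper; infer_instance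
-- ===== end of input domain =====

-- B replaces A's single early-exit loop (with its chain of special-character returns) by two
-- independent first-index scans combined by one comparison; alternative decomposition, same cost.

-- ===== PORT A =====
-- A's for-loop over range(1, len(s)) with early returns, as structural recursion on the index.
-- fuel = number of remaining range steps (started at the list length, enough for the whole
-- range(1, len(s)) walk); structural recursion so the kernel can evaluate the port.
def pvALoop (l : List Char) : Nat → Nat → Option Int
  | 0, _ => none
  | fuel + 1, c =>
    if h : c < l.length then
      if l[c] = PySem.Chars.upperChar l[c] then
        if l[c] = '-' then none
        else if l[c] = ' ' then none
        else if l[c] = '.' then none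
        else if l[c] = ':' then none
        else if l[c] = '\'' then none
        else if l.getD (c - 1) ' ' = PySem.Chars.lowerChar (l.getD (c - 1) ' ') then some (c : Int)
        else pvALoop l fuel (c + 1)
      else pvALoop l fuel (c + 1)
    else none

def lower_to_upper (s : String) : Option Int := pvALoop s.toList s.toList.length 1

-- ===== PORT B =====
def pvSpecial (ch : Char) : Bool := ch = '-' || ch = ' ' || ch = '.' || ch = ':' || ch = '\''

-- first index c ≥ start with l[c] special (same fuel convention as pvALoop)
def pvScanSpecial (l : List Char) : Nat → Nat → Option Nat
  | 0, _ => none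
  | fuel + 1, c =>
    if h : c < l.length then
      if pvSpecial l[c] then some c else pvScanSpecial l fuel (c + 1)
    else none

-- first index c ≥ start where l[c] == upper, not special, and l[c-1] == lower
def pvGood (l : List Char) (c : Nat) : Bool :=
  l.getD c ' ' = PySem.Chars.upperChar (l.getD c ' ')
    && !pvSpecial (l.getD c ' ')
    && l.getD (c - 1) ' ' = PySem.Chars.lowerChar (l.getD (c - 1) ' ')

def pvScanGood (l : List Char) : Nat → Nat → Option Nat
  | 0, _ => none
  | fuel + 1, c =>
    if _h : c < l.length then
      if pvGood l c then some c else pvScanGood l fuel (c + 1)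
    else none

def lower_to_upper_alt (s : String) : Option Int :=
  let l := s.toList
  let posSpecial := pvScanSpecial l l.length 1
  let posGood := pvScanGood l l.length 1
  match posGood, posSpecial with
  | some b, some a => if b < a then some (b : Int) else none
  | some b, none => some (b : Int)
  | none, _ => none

-- ===== PRECONDITION & SPEC =====
def Spec_lower_to_upper (s : String) (out : Option Int) : Prop := out = lower_to_upper_alt s
instance (s : String) (out : Option Int) : Decidable (Spec_lower_to_upper s out) := by unfold Spec_lower_to_upper; infer_instance

-- ===== CLAIM (what is proved, stated in full; the proofs are below) =====
def Claim_equal_lower_to_upper : Prop := ∀ (s : String), Dom_lower_to_upper s → Spec_lower_to_upper s (lower_to_upper s)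

-- ===== LEMMAS AND PROOFS =====

theorem pvScanSpecial_ge (l : List Char) (fuel c a : Nat) (h : pvScanSpecial l fuel c = some a) : c ≤ a := by
  fun_induction pvScanSpecial l fuel c with
  | case1 c => simp_all
  | case2 fuel c h hspec => simp_all
  | case3 fuel c h hspec ih => have := ih h; omega
  | case4 fuel c h => simp_all

theorem pvScanGood_ge (l : List Char) (fuel c a : Nat) (h : pvScanGood l fuel c = some a) : c ≤ a := by
  fun_induction pvScanGood l fuel c with
  | case1 c => simp_all
  | case2 fuel c h hg => simp_all
  | case3 fuel c h hg ih => have := ih h; omega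
  | case4 fuel c h => simp_all

-- A's loop equals the combination of B's two scans, for every fuel and start index.
theorem pvALoop_eq (l : List Char) (fuel c : Nat) :
    pvALoop l fuel c =
      (match pvScanGood l fuel c, pvScanSpecial l fuel c with
       | some b, some a => if b < a then some (b : Int) else none
       | some b, none => some (b : Int)
       | none, _ => none) := by
  fun_induction pvALoop l fuel c with
  | case1 c => rfl
  | case10 fuel c h =>
    rw [pvScanGood, dif_neg h, pvScanSpecial, dif_neg h]
  | case9 fuel c h hup ih =>
    -- s[c] != s[c].upper(): all scans skip c
    have hsF : pvSpecial l[c] = false := by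
      simp only [pvSpecial, Bool.or_eq_false_iff, decide_eq_false_iff_not]
      refine ⟨⟨⟨⟨?_, ?_⟩, ?_⟩, ?_⟩, ?_⟩ <;> intro he <;> exact hup (by rw [he]; decide)
    have hg : pvGood l c = false := by
      unfold pvGood
      rw [List.getD_eq_getElem l ' ' h, decide_eq_false hup]
      simp
    rw [pvScanGood, dif_pos h, if_neg (by simp [hg]),
        pvScanSpecial, dif_pos h, if_neg (by simp [hsF]), ih]
  | case8 fuel c h hup h1 h2 h3 h4 h5 hprev ih =>
    -- upper, not special, previous not lower: all scans skip c
    have hs : pvSpecial l[c] = false := by simp [pvSpecial, h1, h2, h3, h4, h5]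
    have hg : pvGood l c = false := by
      unfold pvGood
      rw [decide_eq_false hprev]
      simp
    rw [pvScanGood, dif_pos h, if_neg (by simp [hg]),
        pvScanSpecial, dif_pos h, if_neg (by simp [hs]), ih]
  | case7 fuel c h hup h1 h2 h3 h4 h5 hprev =>
    -- the good case: A returns c; pvScanGood returns c; any special index is strictly later
    have hs : pvSpecial l[c] = false := by simp [pvSpecial, h1, h2, h3, h4, h5]
    have hg : pvGood l c = true := by
      unfold pvGood
      rw [List.getD_eq_getElem l ' ' h, decide_eq_true hup, decide_eq_true hprev, hs]
      rfl
    rw [pvScanGood, dif_pos h, if_pos hg,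
        pvScanSpecial, dif_pos h, if_neg (by simp [hs])]
    rcases hsp : pvScanSpecial l fuel (c + 1) with _ | a
    · rfl
    · have := pvScanSpecial_ge l fuel (c + 1) a hsp
      simp only
      rw [if_pos (by omega)]
  -- cases 2..6: l[c] is one of the special characters: A returns none; pvScanSpecial hits c
  | case2 fuel c h hup hcs =>
    have hs : pvSpecial l[c] = true := by simp [pvSpecial, hcs]
    have hg : pvGood l c = false := by
      unfold pvGood
      rw [List.getD_eq_getElem l ' ' h, hs]
      simp
    rw [pvScanSpecial, dif_pos h, if_pos hs,
        pvScanGood, dif_pos h, if_neg (by simp [hg])]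
    rcases hgd : pvScanGood l fuel (c + 1) with _ | b
    · rfl
    · have := pvScanGood_ge l fuel (c + 1) b hgd
      simp only
      rw [if_neg (by omega)]
  | case3 fuel c h hup _ hcs =>
    have hs : pvSpecial l[c] = true := by simp [pvSpecial, hcs]
    have hg : pvGood l c = false := by
      unfold pvGood
      rw [List.getD_eq_getElem l ' ' h, hs]
      simp
    rw [pvScanSpecial, dif_pos h, if_pos hs,
        pvScanGood, dif_pos h, if_neg (by simp [hg])]
    rcases hgd : pvScanGood l fuel (c + 1) with _ | b
    · rfl
    · have := pvScanGood_ge l fuel (c + 1) b hgd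
      simp only
      rw [if_neg (by omega)]
  | case4 fuel c h hup _ _ hcs =>
    have hs : pvSpecial l[c] = true := by simp [pvSpecial, hcs]
    have hg : pvGood l c = false := by
      unfold pvGood
      rw [List.getD_eq_getElem l ' ' h, hs]
      simp
    rw [pvScanSpecial, dif_pos h, if_pos hs,
        pvScanGood, dif_pos h, if_neg (by simp [hg])]
    rcases hgd : pvScanGood l fuel (c + 1) with _ | b
    · rfl
    · have := pvScanGood_ge l fuel (c + 1) b hgd
      simp only
      rw [if_neg (by omega)]
  | case5 fuel c h hup _ _ _ hcs =>
    have hs : pvSpecial l[c] = true := by simp [pvSpecial, hcs]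
    have hg : pvGood l c = false := by
      unfold pvGood
      rw [List.getD_eq_getElem l ' ' h, hs]
      simp
    rw [pvScanSpecial, dif_pos h, if_pos hs,
        pvScanGood, dif_pos h, if_neg (by simp [hg])]
    rcases hgd : pvScanGood l fuel (c + 1) with _ | b
    · rfl
    · have := pvScanGood_ge l fuel (c + 1) b hgd
      simp only
      rw [if_neg (by omega)]
  | case6 fuel c h hup _ _ _ _ hcs =>
    have hs : pvSpecial l[c] = true := by simp [pvSpecial, hcs]
    have hg : pvGood l c = false := by
      unfold pvGood
      rw [List.getD_eq_getElem l ' ' h, hs]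
      simp
    rw [pvScanSpecial, dif_pos h, if_pos hs,
        pvScanGood, dif_pos h, if_neg (by simp [hg])]
    rcases hgd : pvScanGood l fuel (c + 1) with _ | b
    · rfl
    · have := pvScanGood_ge l fuel (c + 1) b hgd
      simp only
      rw [if_neg (by omega)]

-- ===== VERDICT (by name: the statement is the Claim_ definition above) =====
theorem lower_to_upper_spec : Claim_equal_lower_to_upper := by
  intro s _
  unfold Spec_lower_to_upper lower_to_upper lower_to_upper_alt
  exact pvALoop_eq s.toList s.toList.length 1
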